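-- pv_equiv track=rewrite | github.com/Vullkano/Programacao-Basica | Aulas/aula_3.py | larger_difference_between_primes
-- ===== SOURCE A (Python) =====
-- def number_of_divisors(x):
--     p = 1
--     divisores = 0
--     while p != x + 1:
--         if x % p == 0:
--             divisores += 1
--             p += 1
--         else:
--             p += 1
--     return divisores
--
-- def is_prime(x):
--     return number_of_divisors(x) == 2
--
-- def larger_difference_between_primes(x):
--     a = 0
--     b = 0
--     c = x - 1
--     while c != 0:
--         if is_prime(c):
--             if a == 0:
--                 a = c
--                 c -= 1
--             elif b == 0:
--                 b = c
--                 c -= 1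
--             else:
--                 c -= 1
--         else:
--             c -= 1
--     return a - b
-- ===== SOURCE B (Python) =====
-- def larger_difference_between_primes(x):
--     def is_prime(n):
--         if n < 2:
--             return False
--         d = 2
--         while d * d <= n:
--             if n % d == 0:
--                 return False
--             d += 1
--         return True
--
--     primes = []
--     c = x - 1
--     while c > 1 and len(primes) < 2:
--         if is_prime(c):
--             primes.append(c)
--         c -= 1
--     a = primes[0] if primes else 0
--     b = primes[1] if len(primes) > 1 else 0
--     return a - b
-- ===== Notes on version B (the rewrite author's own statement) =====
-- stated objective: faster
-- what changed: Replace the count-all-divisors primality test and the full downward scan to 0 by trial division up to sqrt and a downward scan that stops as soon as two primes are found, collecting them in a list.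
-- outside the precondition, e.g. on larger_difference_between_primes(0): A does not finish within the time limit, B returns 0
import Mathlib
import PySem

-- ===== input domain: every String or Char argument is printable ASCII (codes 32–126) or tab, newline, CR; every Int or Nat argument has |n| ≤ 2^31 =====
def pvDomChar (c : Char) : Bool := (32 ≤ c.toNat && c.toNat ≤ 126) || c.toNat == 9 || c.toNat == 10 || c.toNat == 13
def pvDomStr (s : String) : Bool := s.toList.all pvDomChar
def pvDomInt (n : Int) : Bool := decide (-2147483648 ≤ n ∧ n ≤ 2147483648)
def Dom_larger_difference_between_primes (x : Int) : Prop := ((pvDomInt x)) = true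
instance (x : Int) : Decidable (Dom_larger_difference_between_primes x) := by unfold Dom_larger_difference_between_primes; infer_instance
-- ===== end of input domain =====

-- B replaces A's count-all-divisors primality test and full scan down to 0 by trial division
-- up to sqrt and a downward scan that stops after the first two primes (objective: faster).


-- ===== PORT A =====

-- A's `while p != x + 1` loop of number_of_divisors (fuel only makes it total; with
-- fuel x.toNat + 1 it is never exhausted on the admitted inputs).
def pvNdLoop (x : Int) : Nat → Int → Int → Int
  | 0, _, d => d
  | f + 1, p, d =>
    if p = x + 1 then d
    else if PySem.Int.mod x p = 0 then pvNdLoop x f (p + 1) (d + 1)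
    else pvNdLoop x f (p + 1) d

def number_of_divisors (x : Int) : Int := pvNdLoop x (x.toNat + 1) 1 0

def is_prime (x : Int) : Bool := number_of_divisors x == 2

-- A's `while c != 0` loop: returns the final (a, b) state (fuel only makes it total).
def pvALoop : Nat → Int → Int → Int → Int × Int
  | 0, a, b, _ => (a, b)
  | f + 1, a, b, c =>
    if c = 0 then (a, b)
    else if is_prime c then
      if a = 0 then pvALoop f c b (c - 1)
      else if b = 0 then pvALoop f a c (c - 1)
      else pvALoop f a b (c - 1)
    else pvALoop f a b (c - 1)

def larger_difference_between_primes (x : Int) : Int :=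
  let ab := pvALoop (x.toNat + 1) 0 0 (x - 1)
  ab.1 - ab.2

-- ===== PORT B =====

-- B's inner trial-division loop `while d * d <= n` (fuel only makes it total).
def pvTrial (n : Int) : Nat → Int → Bool
  | 0, _ => true
  | f + 1, d =>
    if d * d ≤ n then
      (if PySem.Int.mod n d = 0 then false else pvTrial n f (d + 1))
    else true

def pvIsPrimeB (n : Int) : Bool :=
  if n < 2 then false else pvTrial n n.toNat 2

-- B's `while c > 1 and len(primes) < 2` loop (fuel only makes it total).
def pvBLoop : Nat → List Int → Int → List Int
  | 0, acc, _ => acc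
  | f + 1, acc, c =>
    if 1 < c ∧ acc.length < 2 then
      (if pvIsPrimeB c then pvBLoop f (acc ++ [c]) (c - 1) else pvBLoop f acc (c - 1))
    else acc

def larger_difference_between_primes_alt (x : Int) : Int :=
  let primes := pvBLoop (x.toNat + 1) [] (x - 1)
  let a := match primes with | [] => 0 | h :: _ => h
  let b := match primes with | _ :: b :: _ => b | _ => 0
  a - b

-- ===== PRECONDITION & SPEC =====

-- Pre_ excludes x ≤ 0, on which A's `while c != 0` loop starts at a negative c and
-- never terminates (Python A diverges there; it returns no value).
def Pre_larger_difference_between_primes (x : Int) : Prop := 1 ≤ x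
instance (x : Int) : Decidable (Pre_larger_difference_between_primes x) := by unfold Pre_larger_difference_between_primes; infer_instance

def pvWitness_larger_difference_between_primes : Int := 10

def Spec_larger_difference_between_primes (x : Int) (out : Int) : Prop := out = larger_difference_between_primes_alt x
instance (x : Int) (out : Int) : Decidable (Spec_larger_difference_between_primes x out) := by unfold Spec_larger_difference_between_primes; infer_instance

-- ===== CLAIM (what is proved, stated in full; the proofs are below) =====
def Claim_equal_larger_difference_between_primes : Prop := ∀ (x : Int), Dom_larger_difference_between_primes x → Pre_larger_difference_between_primes x → Spec_larger_difference_between_primes x (larger_difference_between_primes x)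

-- ===== LEMMAS AND PROOFS =====

-- A's divisor-counting loop counts the divisors of n in [p, n].
lemma pvNdLoop_spec (n : ℕ) : ∀ (f : Nat) (p : ℕ) (d : Int), 1 ≤ p → p ≤ n + 1 → n + 1 ≤ p + f →
    pvNdLoop (n : Int) f (p : Int) d
      = d + (((Finset.Ico p (n + 1)).filter (fun q => q ∣ n)).card : Int) := by
  intro f
  induction f with
  | zero =>
    intro p d _ hp2 hp3
    have : p = n + 1 := by omega
    subst this
    simp [pvNdLoop]
  | succ f ih =>
    intro p d hp1 hp2 hp3
    rw [pvNdLoop]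
    by_cases hend : (p : Int) = (n : Int) + 1
    · have : p = n + 1 := by exact_mod_cast hend
      subst this
      simp [hend]
    · have hplt : p < n + 1 := by
        have : ¬ p = n + 1 := fun h => hend (by exact_mod_cast congrArg (Nat.cast : ℕ → ℤ) h)
        omega
      have hsplit : Finset.Ico p (n + 1) = insert p (Finset.Ico (p + 1) (n + 1)) := by
        ext q; simp only [Finset.mem_Ico, Finset.mem_insert]; omega
      have hnotmem : p ∉ Finset.Ico (p + 1) (n + 1) := by simp
      have hdvd : (PySem.Int.mod (n : Int) (p : Int) = 0) ↔ p ∣ n := by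
        rw [PySem.Int.mod_eq_zero_iff_dvd]
        exact Int.natCast_dvd_natCast
      have hrec : ((p : Int) + 1) = ((p + 1 : ℕ) : Int) := by push_cast; ring
      rw [if_neg hend]
      by_cases hdv : p ∣ n
      · rw [if_pos (hdvd.mpr hdv), hrec, ih (p + 1) (d + 1) (by omega) (by omega) (by omega)]
        rw [hsplit, Finset.filter_insert, if_pos hdv,
          Finset.card_insert_of_notMem (fun h => hnotmem (Finset.mem_of_mem_filter _ h))]
        push_cast; ring
      · rw [if_neg (fun h => hdv (hdvd.mp h)), hrec, ih (p + 1) d (by omega) (by omega) (by omega)]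
        rw [hsplit, Finset.filter_insert, if_neg hdv]

lemma number_of_divisors_eq (n : ℕ) (hn : 1 ≤ n) :
    number_of_divisors (n : Int) = (n.divisors.card : Int) := by
  have h0 : ((n : Int)).toNat = n := Int.toNat_natCast n
  have h := pvNdLoop_spec n (n + 1) 1 0 (by omega) (by omega) (by omega)
  unfold number_of_divisors
  rw [h0, Nat.divisors]
  simpa using h

-- card of divisors = 2 characterises primality (for n ≥ 1).
lemma card_divisors_eq_two_iff (n : ℕ) (hn : 1 ≤ n) : n.divisors.card = 2 ↔ n.Prime := by
  constructor
  · intro h2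
    by_contra hnp
    rcases Nat.lt_or_ge n 2 with h | h
    · have : n = 1 := by omega
      subst this
      simp [Nat.divisors_one] at h2
    · obtain ⟨m, hm, hm2, hmlt⟩ := Nat.exists_dvd_of_not_prime2 h hnp
      have hsub : ({1, m, n} : Finset ℕ) ⊆ n.divisors := by
        intro q hq
        simp only [Finset.mem_insert, Finset.mem_singleton] at hq
        rcases hq with rfl | rfl | rfl
        · exact Nat.one_mem_divisors.mpr (by omega)
        · exact Nat.mem_divisors.mpr ⟨hm, by omega⟩
        · exact Nat.mem_divisors.mpr ⟨dvd_rfl, by omega⟩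
      have hcard : ({1, m, n} : Finset ℕ).card = 3 := by
        rw [Finset.card_insert_of_notMem (by simp; omega),
          Finset.card_insert_of_notMem (by simp; omega), Finset.card_singleton]
      have := Finset.card_le_card hsub
      omega
  · intro hp
    rw [hp.divisors]
    rw [Finset.card_insert_of_notMem
      (by simp only [Finset.mem_singleton]; exact fun h => hp.ne_one h.symm),
      Finset.card_singleton]

-- B's trial loop decides "no divisor e with d ≤ e and e * e ≤ n".
lemma pvTrial_spec (n : Int) (hn : 2 ≤ n) : ∀ (f : Nat) (d : Int), 2 ≤ d → n + 1 ≤ d + f →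
    (pvTrial n f d = true ↔ ∀ e : Int, d ≤ e → e * e ≤ n → ¬ e ∣ n) := by
  intro f
  induction f with
  | zero =>
    intro d hd hf
    push_cast at hf
    simp only [pvTrial, true_iff]
    intro e he hee _
    have h2e : 2 ≤ e := by omega
    nlinarith
  | succ f ih =>
    intro d hd hf
    rw [pvTrial]
    by_cases hdd : d * d ≤ n
    · rw [if_pos hdd]
      by_cases hdvd : PySem.Int.mod n d = 0
      · rw [if_pos hdvd]
        simp only [Bool.false_eq_true, false_iff]
        intro h
        exact h d le_rfl hdd ((PySem.Int.mod_eq_zero_iff_dvd n d).mp hdvd)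
      · rw [if_neg hdvd, ih (d + 1) (by omega) (by push_cast at hf ⊢; omega)]
        have hnd : ¬ d ∣ n := fun h => hdvd ((PySem.Int.mod_eq_zero_iff_dvd n d).mpr h)
        constructor
        · intro h e he hee
          rcases eq_or_lt_of_le he with rfl | hlt
          · exact hnd
          · exact h e (by omega) hee
        · intro h e he hee
          exact h e (by omega) hee
    · rw [if_neg hdd]
      simp only [true_iff]
      intro e he hee
      have : d * d ≤ e * e := by nlinarith
      intro _
      nlinarith

lemma pvIsPrimeB_iff (n : ℕ) (hn : 1 ≤ n) : pvIsPrimeB (n : Int) = true ↔ n.Prime := by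
  unfold pvIsPrimeB
  by_cases h2 : (n : Int) < 2
  · have : n = 1 := by omega
    subst this
    simp [Nat.not_prime_one]
  · have hn2 : 2 ≤ n := by omega
    rw [if_neg h2, Int.toNat_natCast,
      pvTrial_spec (n : Int) (by omega) n 2 le_rfl (by omega)]
    rw [Nat.prime_def_le_sqrt]
    constructor
    · intro h
      refine ⟨hn2, fun m hm hms => ?_⟩
      intro hdvd
      have hmm : (m : Int) * (m : Int) ≤ (n : Int) := by
        have := (Nat.le_sqrt.mp hms)
        exact_mod_cast this
      exact h (m : Int) (by exact_mod_cast hm) hmm (Int.natCast_dvd_natCast.mpr hdvd)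
    · rintro ⟨-, h⟩ e he hee hdvd
      have he0 : 0 ≤ e := by omega
      have hme : e = ((e.toNat : ℕ) : Int) := (Int.toNat_of_nonneg he0).symm
      refine h e.toNat (by omega) ?_ ?_
      · rw [Nat.le_sqrt]
        have : (((e.toNat * e.toNat : ℕ)) : Int) ≤ (n : Int) := by push_cast; rw [← hme]; exact hee
        exact_mod_cast this
      · rw [hme] at hdvd
        exact_mod_cast hdvd

-- The two primality tests agree on every positive argument.
lemma is_prime_eq (c : Int) (hc : 1 ≤ c) : is_prime c = pvIsPrimeB c := by
  have hcn : c = ((c.toNat : ℕ) : Int) := (Int.toNat_of_nonneg (by omega)).symm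
  have h1 : 1 ≤ c.toNat := by omega
  have hA : is_prime ((c.toNat : ℕ) : Int) = true ↔ (c.toNat).Prime := by
    unfold is_prime
    rw [number_of_divisors_eq _ h1, beq_iff_eq]
    constructor
    · intro h
      exact (card_divisors_eq_two_iff _ h1).mp (by exact_mod_cast h)
    · intro h
      have := (card_divisors_eq_two_iff _ h1).mpr h
      exact_mod_cast this
  have hB := pvIsPrimeB_iff c.toNat h1
  rw [hcn]
  cases hA' : is_prime ((c.toNat : ℕ) : Int) with
  | true => exact (hB.mpr (hA.mp hA')).symm
  | false =>
    cases hB' : pvIsPrimeB ((c.toNat : ℕ) : Int) with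
    | false => rfl
    | true =>
      have := hA.mpr (hB.mp hB')
      rw [this] at hA'
      exact absurd hA' (by decide)

-- Once both a and b are set, A's loop only burns fuel.
lemma pvALoop_const : ∀ (f : Nat) (a b c : Int), a ≠ 0 → b ≠ 0 → pvALoop f a b c = (a, b) := by
  intro f
  induction f with
  | zero => intro a b c _ _; rfl
  | succ f ih =>
    intro a b c ha hb
    rw [pvALoop]
    by_cases hc : c = 0
    · simp [hc]
    · rw [if_neg hc]
      by_cases hp : is_prime c <;> simp [hp, ha, hb, ih _ _ _ ha hb]

lemma pvALoop_zero (f : Nat) (a b : Int) : pvALoop f a b 0 = (a, b) := by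
  cases f <;> simp [pvALoop]

lemma pvBLoop_stop (f : Nat) (acc : List Int) (c : Int)
    (h : ¬ (1 < c ∧ acc.length < 2)) : pvBLoop f acc c = acc := by
  cases f with
  | zero => rfl
  | succ f => rw [pvBLoop, if_neg h]

def pvResB (l : List Int) : Int :=
  (match l with | [] => 0 | h :: _ => h) - (match l with | _ :: b :: _ => b | _ => 0)

-- The state correspondence: A's (a, b) pair tracks B's prime list.
lemma pvLoops_agree : ∀ (f : Nat) (c a b : Int) (acc : List Int), 0 ≤ c → c.toNat ≤ f →
    ((a = 0 ∧ b = 0 ∧ acc = []) ∨ (a ≠ 0 ∧ b = 0 ∧ acc = [a]) ∨ (a ≠ 0 ∧ b ≠ 0 ∧ acc = [a, b])) →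
    (pvALoop f a b c).1 - (pvALoop f a b c).2 = pvResB (pvBLoop f acc c) := by
  intro f
  induction f with
  | zero =>
    intro c a b acc hc hcf hrel
    rcases hrel with ⟨rfl, rfl, rfl⟩ | ⟨ha, rfl, rfl⟩ | ⟨ha, hb, rfl⟩ <;>
      simp [pvALoop, pvBLoop, pvResB]
  | succ f ih =>
    intro c a b acc hc hcf hrel
    by_cases hc1 : 1 < c
    · -- c ≥ 2: both loops take a step (or A only burns fuel in the two-primes state)
      rcases hrel with ⟨rfl, rfl, rfl⟩ | ⟨ha, rfl, rfl⟩ | ⟨ha, hb, rfl⟩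
      · rw [pvALoop, pvBLoop, if_neg (show ¬ c = 0 by omega), is_prime_eq c (by omega),
          if_pos (show (1 : Int) < c ∧ ([] : List Int).length < 2 from ⟨hc1, by simp⟩)]
        by_cases hp : pvIsPrimeB c = true
        · rw [if_pos hp, if_pos hp, if_pos (show (0 : Int) = 0 from rfl)]
          exact ih (c - 1) c 0 ([] ++ [c]) (by omega) (by omega)
            (Or.inr (Or.inl ⟨by omega, rfl, by simp⟩))
        · rw [if_neg hp, if_neg hp]
          exact ih (c - 1) 0 0 [] (by omega) (by omega) (Or.inl ⟨rfl, rfl, rfl⟩)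
      · rw [pvALoop, pvBLoop, if_neg (show ¬ c = 0 by omega), is_prime_eq c (by omega),
          if_pos (show (1 : Int) < c ∧ ([a] : List Int).length < 2 from ⟨hc1, by simp⟩)]
        by_cases hp : pvIsPrimeB c = true
        · rw [if_pos hp, if_pos hp, if_neg ha, if_pos (show (0 : Int) = 0 from rfl)]
          exact ih (c - 1) a c ([a] ++ [c]) (by omega) (by omega)
            (Or.inr (Or.inr ⟨ha, by omega, by simp⟩))
        · rw [if_neg hp, if_neg hp]
          exact ih (c - 1) a 0 [a] (by omega) (by omega) (Or.inr (Or.inl ⟨ha, rfl, rfl⟩))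
      · rw [pvALoop_const _ _ _ _ ha hb, pvBLoop_stop _ _ _ (by simp)]
        simp [pvResB]
    · -- c = 0 or c = 1: B's loop stops; A returns (a, b) at once or after the c = 1 step
      rw [pvBLoop_stop _ _ _ (fun h => hc1 h.1)]
      have key : pvALoop (f + 1) a b c = (a, b) := by
        rcases (show c = 0 ∨ c = 1 by omega) with rfl | rfl
        · exact pvALoop_zero _ _ _
        · rw [pvALoop, if_neg (by norm_num), show is_prime 1 = false from by decide]
          simp only [Bool.false_eq_true, if_false]
          rw [show (1 : Int) - 1 = 0 by norm_num]
          exact pvALoop_zero f a b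
      rw [key]
      rcases hrel with ⟨rfl, rfl, rfl⟩ | ⟨ha, rfl, rfl⟩ | ⟨ha, hb, rfl⟩ <;> simp [pvResB]

-- ===== VERDICT (by name: the statement is the Claim_ definition above) =====
theorem larger_difference_between_primes_spec : Claim_equal_larger_difference_between_primes := by
  intro x _ hpre
  unfold Spec_larger_difference_between_primes
  show larger_difference_between_primes x = larger_difference_between_primes_alt x
  unfold larger_difference_between_primes larger_difference_between_primes_alt
  have h1 : (1 : Int) ≤ x := hpre
  exact pvLoops_agree (x.toNat + 1) (x - 1) 0 0 [] (by omega) (by omega) (Or.inl ⟨rfl, rfl, rfl⟩)
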